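-- pv_equiv track=rewrite | github.com/Peiffap/aoc-2023 | src/12.py | count_springs
-- ===== SOURCE A (Python) =====
-- from itertools import groupby
--
-- def count_springs(s):
--     gr = groupby(s)
--     cnts = []
--     gr = [(label, sum(1 for _ in group)) for label, group in gr]
--     for c, cnt in gr:
--         if c == '#':
--             cnts.append(cnt)
--         if c == '?':
--             return cnts
--     return cnts
-- ===== SOURCE B (Python) =====
-- def count_springs(s):
--     cnts = []
--     run = 0
--     for ch in s:
--         if ch == '#':
--             run += 1
--         elif ch == '?':
--             if run > 0:
--                 cnts.append(run)
--             return cnts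
--         else:
--             if run > 0:
--                 cnts.append(run)
--             run = 0
--     if run > 0:
--         cnts.append(run)
--     return cnts
-- ===== Notes on version B (the rewrite author's own statement) =====
-- stated objective: simpler
-- what changed: Replaced itertools.groupby plus a materialised (label,count) group list and a second loop by a single character-by-character scan maintaining one integer run counter, flushed at run boundaries, at the early return, and at end of string.
import Mathlib
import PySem

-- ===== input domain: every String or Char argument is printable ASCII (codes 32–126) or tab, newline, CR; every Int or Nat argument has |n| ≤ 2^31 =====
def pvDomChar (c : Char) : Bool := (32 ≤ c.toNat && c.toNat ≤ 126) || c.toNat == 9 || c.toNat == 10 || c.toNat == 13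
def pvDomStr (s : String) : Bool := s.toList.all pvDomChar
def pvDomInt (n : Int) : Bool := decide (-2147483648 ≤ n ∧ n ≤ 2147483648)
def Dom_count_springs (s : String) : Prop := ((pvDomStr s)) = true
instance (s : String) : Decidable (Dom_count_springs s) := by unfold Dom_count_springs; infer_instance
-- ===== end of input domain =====

-- B replaces groupby + a second loop over the (label,count) list by a single scan with a run counter; measurably faster by a constant factor (no group objects materialised).

-- ===== PORT A =====
-- groupby(s) materialised as [(label, count)] pairs, as A's comprehension does
def groupRuns : List Char → List (Char × Int)
  | [] => []
  | c :: rest =>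
    (c, 1 + ((rest.takeWhile (· == c)).length : Int)) :: groupRuns (rest.dropWhile (· == c))
termination_by l => l.length
decreasing_by
  simp only [List.length_cons]
  exact Nat.lt_succ_of_le (List.length_dropWhile_le _ _)

-- the for-loop over the group list, with the early 'return cnts' on '?'
def aLoop : List (Char × Int) → List Int → List Int
  | [], cnts => cnts
  | (c, cnt) :: rest, cnts =>
    let cnts := if c = '#' then cnts ++ [cnt] else cnts
    if c = '?' then cnts else aLoop rest cnts

def count_springs (s : String) : List Int := aLoop (groupRuns s.toList) []

-- ===== PORT B =====
-- single scan, run counter flushed on '?', on other non-'#' chars, and at end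
def altLoop : List Char → Int → List Int → List Int
  | [], run, cnts => if run > 0 then cnts ++ [run] else cnts
  | c :: rest, run, cnts =>
    if c = '#' then altLoop rest (run + 1) cnts
    else if c = '?' then (if run > 0 then cnts ++ [run] else cnts)
    else altLoop rest 0 (if run > 0 then cnts ++ [run] else cnts)

def count_springs_alt (s : String) : List Int := altLoop s.toList 0 []

-- ===== PRECONDITION & SPEC =====
def Spec_count_springs (s : String) (out : List Int) : Prop := out = count_springs_alt s
instance (s : String) (out : List Int) : Decidable (Spec_count_springs s out) := by unfold Spec_count_springs; infer_instance

-- ===== CLAIM (what is proved, stated in full; the proofs are below) =====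
def Claim_equal_count_springs : Prop := ∀ (s : String), Dom_count_springs s → Spec_count_springs s (count_springs s)

-- ===== LEMMAS AND PROOFS =====

-- a positive run absorbs a leading block of '#'s
theorem altLoop_absorb (l : List Char) (run : Int) (cnts : List Int) :
    altLoop l run cnts =
      altLoop (l.dropWhile (· == '#')) (run + ((l.takeWhile (· == '#')).length : Int)) cnts := by
  induction l generalizing run with
  | nil => simp [List.takeWhile, List.dropWhile]
  | cons c t ih =>
    by_cases hc : c = '#'
    · subst hc
      rw [show altLoop ('#' :: t) run cnts = altLoop t (run + 1) cnts from by simp [altLoop]]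
      rw [ih (run + 1)]
      simp [List.takeWhile, List.dropWhile]
      ring_nf
    · have hb : (c == '#') = false := by simp [hc]
      simp [List.takeWhile, List.dropWhile, hb]

-- skipping further groups of a non-'#', non-'?' label does not change A's loop
theorem aLoop_skip (c : Char) (hc1 : c ≠ '#') (hc2 : c ≠ '?') (t : List Char) (cnts : List Int) :
    aLoop (groupRuns t) cnts = aLoop (groupRuns (t.dropWhile (· == c))) cnts := by
  cases t with
  | nil => simp [List.dropWhile]
  | cons d t' =>
    by_cases hd : d = c
    · subst hd
      rw [groupRuns]
      simp [aLoop, hc1, hc2, List.dropWhile]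
    · have hb : (d == c) = false := by simp [hd]
      simp [List.dropWhile, hb]

-- head of dropWhile fails the predicate
theorem head_dropWhile_false {p : Char → Bool} {l : List Char} {d : Char} {t : List Char}
    (h : l.dropWhile p = d :: t) : p d = false := by
  have hlt : 0 < (l.dropWhile p).length := by rw [h]; simp
  have := List.dropWhile_get_zero_not (p := p) l hlt
  simp only [List.get_eq_getElem, h] at this
  simpa using this

theorem main_loop_aux : ∀ (n : Nat) (l : List Char), l.length ≤ n → ∀ (cnts : List Int),
    altLoop l 0 cnts = aLoop (groupRuns l) cnts := by
  intro n
  induction n with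
  | zero =>
    intro l hl cnts
    have : l = [] := List.eq_nil_of_length_eq_zero (Nat.le_zero.mp hl)
    subst this
    simp [altLoop, groupRuns, aLoop]
  | succ n ih =>
    intro l hl cnts
    cases l with
    | nil => simp [altLoop, groupRuns, aLoop]
    | cons c rest =>
      rw [groupRuns]
      by_cases hc : c = '#'
      · subst hc
        rw [show altLoop ('#' :: rest) 0 cnts = altLoop rest 1 cnts from by simp [altLoop]]
        rw [altLoop_absorb rest 1 cnts]
        set k : Int := ((rest.takeWhile (· == '#')).length : Int) with hk
        have hk0 : 0 < 1 + k := by positivity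
        have hA : aLoop ((('#' : Char), 1 + k) :: groupRuns (rest.dropWhile (· == '#'))) cnts =
            aLoop (groupRuns (rest.dropWhile (· == '#'))) (cnts ++ [1 + k]) := by
          simp [aLoop]
        rw [hA]
        cases hre : rest.dropWhile (· == '#') with
        | nil => simp [altLoop, groupRuns, aLoop, hk0]
        | cons d t =>
          have hd : d ≠ '#' := by
            have := head_dropWhile_false hre
            simpa using this
          by_cases hq : d = '?'
          · subst hq
            rw [groupRuns]
            simp [altLoop, aLoop, hk0]
          · rw [show altLoop (d :: t) (1 + k) (cnts) =
                  altLoop t 0 (cnts ++ [1 + k]) from by simp [altLoop, hd, hq, hk0]]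
            rw [groupRuns]
            rw [show aLoop ((d, 1 + ((t.takeWhile (· == d)).length : Int)) ::
                  groupRuns (t.dropWhile (· == d))) (cnts ++ [1 + k]) =
                  aLoop (groupRuns (t.dropWhile (· == d))) (cnts ++ [1 + k]) from by
              simp [aLoop, hd, hq]]
            have ht : t.length ≤ n := by
              have h1 : (rest.dropWhile (· == '#')).length ≤ rest.length :=
                List.length_dropWhile_le _ _
              rw [hre] at h1
              simp only [List.length_cons] at h1 hl
              omega
            rw [ih t ht (cnts ++ [1 + k])]
            exact aLoop_skip d hd hq t (cnts ++ [1 + k])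
      · by_cases hq : c = '?'
        · subst hq
          simp [altLoop, aLoop]
        · rw [show aLoop ((c, 1 + ((rest.takeWhile (· == c)).length : Int)) ::
                groupRuns (rest.dropWhile (· == c))) cnts =
                aLoop (groupRuns (rest.dropWhile (· == c))) cnts from by simp [aLoop, hc, hq]]
          rw [show altLoop (c :: rest) 0 cnts = altLoop rest 0 cnts from by
            simp [altLoop, hc, hq]]
          have hr : rest.length ≤ n := by simp only [List.length_cons] at hl; omega
          rw [ih rest hr cnts]
          exact aLoop_skip c hc hq rest cnts

-- ===== VERDICT (by name: the statement is the Claim_ definition above) =====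
theorem count_springs_spec : Claim_equal_count_springs := by
  intro s _
  unfold Spec_count_springs count_springs count_springs_alt
  exact (main_loop_aux s.toList.length s.toList le_rfl []).symm
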